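-- pv_equiv track=rewrite | github.com/teriyakichild/mcp-condenser | mcp_condenser/condenser.py | order_columns
-- ===== SOURCE A (Python) =====
-- def order_columns(cols: list[str]) -> list[str]:
--     id_kw = {"name", "id", "ref", "uid", "namespace", "label", "nodename"}
--     ids, rest = [], []
--     for c in cols:
--         if c.split(".")[-1].lower() in id_kw:
--             ids.append(c)
--         else:
--             rest.append(c)
--     return ids + rest
-- ===== SOURCE B (Python) =====
-- def order_columns(cols: list[str]) -> list[str]:
--     id_kw = {"name", "id", "ref", "uid", "namespace", "label", "nodename"}
--     return sorted(cols, key=lambda c: 0 if c.split(".")[-1].lower() in id_kw else 1)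
-- ===== Notes on version B (the rewrite author's own statement) =====
-- stated objective: idiomatic
-- what changed: Replaces the two-bucket partition loop with a single stable sort keyed 0/1 on id-likeness; stability preserves original relative order inside each group.
import Mathlib
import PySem

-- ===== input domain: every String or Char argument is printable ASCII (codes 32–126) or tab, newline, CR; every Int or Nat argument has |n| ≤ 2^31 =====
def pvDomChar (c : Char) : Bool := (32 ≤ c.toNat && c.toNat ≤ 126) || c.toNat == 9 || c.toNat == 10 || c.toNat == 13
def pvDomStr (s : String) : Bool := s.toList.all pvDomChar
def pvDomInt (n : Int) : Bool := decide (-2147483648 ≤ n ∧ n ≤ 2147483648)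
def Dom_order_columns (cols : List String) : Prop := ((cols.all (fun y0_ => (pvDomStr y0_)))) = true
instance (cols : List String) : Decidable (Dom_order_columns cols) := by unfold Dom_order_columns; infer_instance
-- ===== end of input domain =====

-- B replaces A's two-bucket partition loop by one stable sort on a 0/1 key (idiomatic; same behaviour).

-- ===== PORT A =====
-- shared key computation, verbatim in both Pythons: c.split(".")[-1].lower() in id_kw
-- (split with a non-empty separator always yields a non-empty list, so [-1] is its last element;
--  the .getD defaults are unreachable)
def pvIdKw : List String := ["name", "id", "ref", "uid", "namespace", "label", "nodename"]
def pvIdLike (c : String) : Bool :=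
  pvIdKw.contains (PySem.Str.lower (((PySem.Str.split? c ".").getD [c]).getLastD ""))

def order_columns (cols : List String) : List String :=
  let r := cols.foldl
    (fun (acc : List String × List String) c =>
      if pvIdLike c then (acc.1 ++ [c], acc.2) else (acc.1, acc.2 ++ [c]))
    ([], [])
  r.1 ++ r.2

-- ===== PORT B =====
def order_columns_alt (cols : List String) : List String :=
  PySem.List.sorted cols (fun c => if pvIdLike c then (0 : Int) else 1) false

-- ===== PRECONDITION & SPEC =====
def Spec_order_columns (cols : List String) (out : List String) : Prop := out = order_columns_alt cols
instance (cols : List String) (out : List String) : Decidable (Spec_order_columns cols out) := by unfold Spec_order_columns; infer_instance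

-- ===== CLAIM (what is proved, stated in full; the proofs are below) =====
def Claim_equal_order_columns : Prop := ∀ (cols : List String), Dom_order_columns cols → Spec_order_columns cols (order_columns cols)

-- ===== LEMMAS AND PROOFS =====

def pvKey (c : String) : Int := if pvIdLike c then 0 else 1

lemma pv_insertBy_partition (x : String) (as bs : List String)
    (ha : ∀ a ∈ as, pvIdLike a = true) (hb : ∀ b ∈ bs, pvIdLike b = false) :
    PySem.List.insertBy (fun a b => decide (pvKey a < pvKey b)) x (as ++ bs) =
      if pvIdLike x then as ++ x :: bs else (as ++ bs) ++ [x] := by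
  by_cases hx : pvIdLike x = true
  · simp only [hx, if_true]
    induction as with
    | nil =>
      cases bs with
      | nil => simp [PySem.List.insertBy]
      | cons b bs' =>
        have hbb : pvIdLike b = false := hb b (by simp)
        simp [PySem.List.insertBy, pvKey, hx, hbb]
    | cons a as' ih =>
      have haa : pvIdLike a = true := ha a (by simp)
      have ih' := ih (fun a' h' => ha a' (by simp [h']))
      have hcond : decide (pvKey x < pvKey a) = false := by simp [pvKey, hx, haa]
      simp [PySem.List.insertBy, hcond, ih']
  · simp only [hx]
    apply PySem.List.insertBy_of_forall_not_before
    intro y hy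
    simp only [pvKey, hx, decide_eq_false_iff_not, not_lt]
    split <;> simp

lemma pv_sorted_foldl (cols : List String) (as bs : List String)
    (ha : ∀ a ∈ as, pvIdLike a = true) (hb : ∀ b ∈ bs, pvIdLike b = false) :
    cols.foldl (fun acc x => PySem.List.insertBy (fun a b => decide (pvKey a < pvKey b)) x acc)
        (as ++ bs) =
      (as ++ cols.filter pvIdLike) ++ (bs ++ cols.filter (fun c => !pvIdLike c)) := by
  induction cols generalizing as bs with
  | nil => simp
  | cons x rest ih =>
    simp only [List.foldl_cons]
    rw [pv_insertBy_partition x as bs ha hb]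
    by_cases hx : pvIdLike x = true
    · simp only [hx, if_true]
      have : as ++ x :: bs = (as ++ [x]) ++ bs := by simp
      rw [this, ih (as ++ [x]) bs
        (by intro a hmem; rcases List.mem_append.mp hmem with h | h
            · exact ha a h
            · simp at h; simpa [h]) hb]
      simp [hx]
    · have hx' : pvIdLike x = false := by simpa using hx
      simp only [hx', Bool.false_eq_true, if_false]
      have : (as ++ bs) ++ [x] = as ++ (bs ++ [x]) := by simp
      rw [this, ih as (bs ++ [x]) ha
        (by intro b hmem; rcases List.mem_append.mp hmem with h | h
            · exact hb b h
            · simp at h; simpa [h])]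
      simp [hx']

lemma pv_loopA (cols : List String) (ids rest : List String) :
    cols.foldl
        (fun (acc : List String × List String) c =>
          if pvIdLike c then (acc.1 ++ [c], acc.2) else (acc.1, acc.2 ++ [c]))
        (ids, rest) =
      (ids ++ cols.filter pvIdLike, rest ++ cols.filter (fun c => !pvIdLike c)) := by
  induction cols generalizing ids rest with
  | nil => simp
  | cons x t ih =>
    by_cases hx : pvIdLike x = true
    · simp [List.foldl_cons, hx, ih]
    · have hx' : pvIdLike x = false := by simpa using hx
      simp [List.foldl_cons, hx', ih]

lemma pv_alt_eq (cols : List String) :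
    order_columns_alt cols = cols.filter pvIdLike ++ cols.filter (fun c => !pvIdLike c) := by
  unfold order_columns_alt
  have h : (fun c => if pvIdLike c then (0 : Int) else 1) = pvKey := by
    funext c; rfl
  rw [h, PySem.List.sorted_eq_foldl_insertBy]
  have := pv_sorted_foldl cols [] [] (by simp) (by simp)
  simpa using this

-- ===== VERDICT (by name: the statement is the Claim_ definition above) =====
theorem order_columns_spec : Claim_equal_order_columns := by
  intro cols _
  unfold Spec_order_columns
  rw [pv_alt_eq]
  unfold order_columns
  rw [pv_loopA cols [] []]
  simp
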